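-- pv_equiv track=rewrite | github.com/ABanerjee33/BWSICubeSat | FlightCode/color_id.py | square_list
-- ===== SOURCE A (Python) =====
-- def square_list(pixels, small, med, big, buffer, max_small, max_med, max_big):
--     """ Counts the number of squares of different sizes.
--         INPUT: a ton of variables, representing:
--         pixel = number of pixels
--         small, med, and big are the areas of those respective squares
--         buffer = the buffer defined a few dozen lines earlier
--         max_small, max_med, and max_big: the maximum number of pieces of plastic of each color and size
--
--         OUTPUT: a list containg the number of small, medium, and big pieces of that color
--     """
--     big_lst = []
--
--     for x in range(max_small):
--         for y in range(max_med):
--             for z in range(max_big):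
--                 if (pixels - buffer) < (small*x + med*y + big*z) < (pixels + buffer):
--                     diff = abs(pixels - (small*x + med*y + big*z))
--                     big_lst += [[diff, [x, y, z]]]
--
--     # if the color isn't actually there, make sure it doesn't count:
--     if pixels < 175:
--         return [0, 0, 0]
--
--     # Returns the number of small, medium, and big pieces
--     if len(big_lst) > 0:
--         mxx = min(big_lst)
--         return mxx[1]
--     return [0, 0, 0]
--     return [0, 0, 0]
-- ===== SOURCE B (Python) =====
-- def _best_z(t, big, max_big):
--     """Best z in range(max_big) for target t: minimizes (|t - big*z|, z).
--     None iff the range is empty. Found analytically from floor division."""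
--     if max_big <= 0:
--         return None
--     if big == 0:
--         return (abs(t), 0)
--     q = t // big
--     zs = q if abs(t - big * q) <= abs(t - big * (q + 1)) else q + 1
--     zc = max(0, min(max_big - 1, zs))
--     return (abs(t - big * zc), zc)
--
--
-- def square_list(pixels, small, med, big, buffer, max_small, max_med, max_big):
--     # B: eliminates A's inner z-loop (best z computed analytically) and keeps a
--     # running minimum instead of building a list of all candidates.
--     if pixels < 175:
--         return [0, 0, 0]
--     best = None  # (diff, x, y, z), compared lexicographically
--     for x in range(max_small):
--         for y in range(max_med):
--             dz = _best_z(pixels - small * x - med * y, big, max_big)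
--             if dz is None:
--                 continue
--             d, z = dz
--             if d < buffer:
--                 cand = (d, x, y, z)
--                 if best is None or cand < best:
--                     best = cand
--     if best is None:
--         return [0, 0, 0]
--     return [best[1], best[2], best[3]]
-- ===== Notes on version B (the rewrite author's own statement) =====
-- stated objective: faster
-- what changed: A enumerates all (x,y,z) triples, stores every candidate within the buffer in a list and takes min(); B removes the inner z-loop entirely: for each (x,y) the best z is computed analytically as the clamped floor quotient (checking its right neighbour), and a running lexicographic minimum replaces the list.
import Mathlib
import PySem

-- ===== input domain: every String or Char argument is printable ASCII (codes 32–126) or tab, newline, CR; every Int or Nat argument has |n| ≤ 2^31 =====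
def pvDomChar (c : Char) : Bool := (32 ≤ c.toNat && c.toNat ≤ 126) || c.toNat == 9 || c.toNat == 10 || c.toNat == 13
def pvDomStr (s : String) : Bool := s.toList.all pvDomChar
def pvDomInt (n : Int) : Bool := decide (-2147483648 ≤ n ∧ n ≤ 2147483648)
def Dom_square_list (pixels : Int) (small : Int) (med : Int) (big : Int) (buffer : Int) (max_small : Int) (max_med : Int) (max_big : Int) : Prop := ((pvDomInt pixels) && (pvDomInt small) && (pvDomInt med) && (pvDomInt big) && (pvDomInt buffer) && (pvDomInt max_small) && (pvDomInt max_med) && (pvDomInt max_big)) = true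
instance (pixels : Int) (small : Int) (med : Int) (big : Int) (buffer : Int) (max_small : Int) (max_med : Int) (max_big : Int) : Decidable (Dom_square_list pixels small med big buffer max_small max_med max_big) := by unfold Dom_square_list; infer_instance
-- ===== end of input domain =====

-- B eliminates A's inner z-loop by computing the best z analytically from floor
-- division (clamped into range), keeping a running minimum instead of building a
-- list: an asymptotically faster exact re-implementation.


-- ===== PORT A =====
-- Python compares the elements [diff, [x, y, z]] of big_lst lexicographically;
-- hand-ported (exact) as lexicographic order on the flattened tuple (diff, x, y, z).
def entLt (a b : Int × Int × Int × Int) : Bool :=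
  decide (a.1 < b.1 ∨ (a.1 = b.1 ∧ (a.2.1 < b.2.1 ∨ (a.2.1 = b.2.1 ∧
    (a.2.2.1 < b.2.2.1 ∨ (a.2.2.1 = b.2.2.1 ∧ a.2.2.2 < b.2.2.2))))))

def square_list (pixels : Int) (small : Int) (med : Int) (big : Int) (buffer : Int) (max_small : Int) (max_med : Int) (max_big : Int) : List Int :=
  let big_lst : List (Int × Int × Int × Int) :=
    (PySem.List.pyRange 0 max_small 1).foldl (fun acc x =>
      (PySem.List.pyRange 0 max_med 1).foldl (fun acc y =>
        (PySem.List.pyRange 0 max_big 1).foldl (fun acc z =>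
          if pixels - buffer < small * x + med * y + big * z ∧
              small * x + med * y + big * z < pixels + buffer then
            acc ++ [(|pixels - (small * x + med * y + big * z)|, x, y, z)]
          else acc) acc) acc) []
  if pixels < 175 then [0, 0, 0]
  else
    match big_lst with
    | [] => [0, 0, 0]
    | h :: t =>
      -- min(big_lst): Python's min keeps the first minimal element
      let mxx := t.foldl (fun m e => if entLt e m then e else m) h
      [mxx.2.1, mxx.2.2.1, mxx.2.2.2]

-- ===== PORT B =====
-- best z in range(max_big) for target t (none iff the range is empty): (diff, z)
def bestZ (t : Int) (big : Int) (max_big : Int) : Option (Int × Int) :=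
  if max_big ≤ 0 then none
  else if big = 0 then some (|t|, 0)
  else
    let q := PySem.Int.floordiv t big
    let zs := if |t - big * q| ≤ |t - big * (q + 1)| then q else q + 1
    let zc := max 0 (min (max_big - 1) zs)
    some (|t - big * zc|, zc)

def square_list_alt (pixels : Int) (small : Int) (med : Int) (big : Int) (buffer : Int) (max_small : Int) (max_med : Int) (max_big : Int) : List Int :=
  if pixels < 175 then [0, 0, 0]
  else
    let best : Option (Int × Int × Int × Int) :=
      (PySem.List.pyRange 0 max_small 1).foldl (fun b x =>
        (PySem.List.pyRange 0 max_med 1).foldl (fun b y =>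
          match bestZ (pixels - small * x - med * y) big max_big with
          | none => b
          | some dz =>
            if dz.1 < buffer then
              match b with
              | none => some (dz.1, x, y, dz.2)
              | some m => if entLt (dz.1, x, y, dz.2) m then some (dz.1, x, y, dz.2) else some m
            else b) b) none
    match best with
    | none => [0, 0, 0]
    | some m => [m.2.1, m.2.2.1, m.2.2.2]

-- ===== PRECONDITION & SPEC =====
def Spec_square_list (pixels : Int) (small : Int) (med : Int) (big : Int) (buffer : Int) (max_small : Int) (max_med : Int) (max_big : Int) (out : List Int) : Prop := out = square_list_alt pixels small med big buffer max_small max_med max_big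
instance (pixels : Int) (small : Int) (med : Int) (big : Int) (buffer : Int) (max_small : Int) (max_med : Int) (max_big : Int) (out : List Int) : Decidable (Spec_square_list pixels small med big buffer max_small max_med max_big out) := by unfold Spec_square_list; infer_instance

-- ===== CLAIM (what is proved, stated in full; the proofs are below) =====
def Claim_equal_square_list : Prop := ∀ (pixels : Int) (small : Int) (med : Int) (big : Int) (buffer : Int) (max_small : Int) (max_med : Int) (max_big : Int), Dom_square_list pixels small med big buffer max_small max_med max_big → Spec_square_list pixels small med big buffer max_small max_med max_big (square_list pixels small med big buffer max_small max_med max_big)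

-- ===== LEMMAS AND PROOFS =====

-- Python-min combination of two optional candidates (keep the left on ties).
def ocomb (a b : Option (Int × Int × Int × Int)) : Option (Int × Int × Int × Int) :=
  match a, b with
  | none, b => b
  | some x, none => some x
  | some x, some y => if entLt y x then some y else some x

-- first minimal element of a list (Python min), as a fold
def fmin (l : List (Int × Int × Int × Int)) : Option (Int × Int × Int × Int) :=
  l.foldl (fun o e => ocomb o (some e)) none

-- the group of big_lst entries contributed by a fixed (x, y)
def grp (t big buffer m x y : Int) : List (Int × Int × Int × Int) :=
  ((PySem.List.pyRange 0 m 1).filter (fun z => decide (|t - big * z| < buffer))).map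
    (fun z => (|t - big * z|, x, y, z))

theorem entLt_irrefl (a : Int × Int × Int × Int) : entLt a a = false := by
  simp [entLt]

theorem entLt_asymm (a b : Int × Int × Int × Int) (h : entLt a b = true) : entLt b a = false := by
  simp [entLt] at *; omega

theorem ocomb_none_right (a : Option (Int × Int × Int × Int)) : ocomb a none = a := by
  cases a <;> rfl

theorem ocomb_assoc (a b c : Option (Int × Int × Int × Int)) :
    ocomb (ocomb a b) c = ocomb a (ocomb b c) := by
  cases a with
  | none => rfl
  | some x =>
    cases b with
    | none => cases c <;> rfl
    | some y =>
      cases c with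
      | none => rw [ocomb_none_right, ocomb_none_right]
      | some z =>
        obtain ⟨x1, x2, x3, x4⟩ := x
        obtain ⟨y1, y2, y3, y4⟩ := y
        obtain ⟨z1, z2, z3, z4⟩ := z
        simp only [ocomb, entLt, decide_eq_true_eq]
        split_ifs <;> simp only [ocomb, entLt, decide_eq_true_eq] <;> split_ifs <;>
          simp only [Option.some.injEq, Prod.mk.injEq] <;> omega

theorem foldl_ocomb_init {ι : Type} (g : ι → Option (Int × Int × Int × Int)) :
    ∀ (l : List ι) (a : Option (Int × Int × Int × Int)),
      l.foldl (fun o i => ocomb o (g i)) a =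
        ocomb a (l.foldl (fun o i => ocomb o (g i)) none) := by
  intro l
  induction l with
  | nil => intro a; simp [ocomb_none_right]
  | cons h t ih =>
    intro a
    simp only [List.foldl_cons]
    rw [ih (ocomb a (g h)), ih (ocomb none (g h)), ocomb_assoc]
    rfl

theorem fmin_append (l1 l2 : List (Int × Int × Int × Int)) :
    fmin (l1 ++ l2) = ocomb (fmin l1) (fmin l2) := by
  unfold fmin
  rw [List.foldl_append]
  exact foldl_ocomb_init (fun e => some e) l2 _

theorem fmin_flatMap {ι : Type} (g : ι → List (Int × Int × Int × Int)) (l : List ι) :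
    fmin (l.flatMap g) = l.foldl (fun o i => ocomb o (fmin (g i))) none := by
  induction l with
  | nil => rfl
  | cons h t ih =>
    simp only [List.flatMap_cons, fmin_append, ih, List.foldl_cons]
    rw [foldl_ocomb_init (fun i => fmin (g i)) t (ocomb none (fmin (g h)))]
    rfl

-- sorry placeholder proofs below are filled in incrementally
theorem foldl_ocomb_some (t : List (Int × Int × Int × Int)) :
    ∀ c, t.foldl (fun o e => ocomb o (some e)) (some c) =
      some (t.foldl (fun m e => if entLt e m then e else m) c) := by
  induction t with
  | nil => intro c; rfl
  | cons h t ih =>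
    intro c
    simp only [List.foldl_cons]
    rw [show ocomb (some c) (some h) = some (if entLt h c then h else c) from by
      by_cases hc' : entLt h c <;> simp [ocomb, hc'], ih]

theorem fmin_cons (h : Int × Int × Int × Int) (t : List (Int × Int × Int × Int)) :
    fmin (h :: t) = some (t.foldl (fun m e => if entLt e m then e else m) h) := by
  unfold fmin
  simp only [List.foldl_cons]
  exact foldl_ocomb_some t h

theorem foldl_ocomb_keep (m : Int × Int × Int × Int) (l : List (Int × Int × Int × Int))
    (hall : ∀ e ∈ l, e = m ∨ entLt m e = true) :
    l.foldl (fun o e => ocomb o (some e)) (some m) = some m := by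
  induction l with
  | nil => rfl
  | cons h t ih =>
    simp only [List.foldl_cons]
    have hh : ocomb (some m) (some h) = some m := by
      rcases hall h (by simp) with he | he
      · subst he; simp [ocomb, entLt_irrefl]
      · simp [ocomb, entLt_asymm m h he]
    rw [hh]
    exact ih (fun e he => hall e (by simp [he]))

theorem foldl_ocomb_reach (m : Int × Int × Int × Int) (l : List (Int × Int × Int × Int)) :
    ∀ c, m ∈ l → (∀ e ∈ l, e = m ∨ entLt m e = true) → entLt m c = true →
      l.foldl (fun o e => ocomb o (some e)) (some c) = some m := by
  induction l with
  | nil => intro c hc; simp at hc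
  | cons h t ih =>
    intro c hm hall hc
    simp only [List.foldl_cons]
    by_cases hh : h = m
    · subst hh
      rw [show ocomb (some c) (some h) = some h from by simp [ocomb, hc]]
      exact foldl_ocomb_keep h t (fun e he => hall e (by simp [he]))
    · have hmh : entLt m h = true := by
        rcases hall h (by simp) with he | he
        · exact absurd he hh
        · exact he
      have hmem : m ∈ t := by
        rcases List.mem_cons.mp hm with he | he
        · exact absurd he.symm hh
        · exact he
      rw [show ocomb (some c) (some h) = some (if entLt h c then h else c) from by
        by_cases hc' : entLt h c <;> simp [ocomb, hc']]
      by_cases hhc : entLt h c <;> simp only [hhc, if_true, if_false, Bool.false_eq_true, ite_true, ite_false]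
      · exact ih h hmem (fun e he => hall e (by simp [he])) hmh
      · exact ih c hmem (fun e he => hall e (by simp [he])) hc

theorem fmin_eq_of_min (l : List (Int × Int × Int × Int)) (m : Int × Int × Int × Int)
    (hm : m ∈ l) (hall : ∀ e ∈ l, e = m ∨ entLt m e = true) : fmin l = some m := by
  cases l with
  | nil => simp at hm
  | cons h t =>
    unfold fmin
    simp only [List.foldl_cons]
    rw [show ocomb none (some h) = some h from rfl]
    by_cases hh : h = m
    · subst hh; exact foldl_ocomb_keep h t (fun e he => hall e (by simp [he]))
    · have hmh : entLt m h = true := by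
        rcases hall h (by simp) with he | he
        · exact absurd he hh
        · exact he
      have hmem : m ∈ t := by
        rcases List.mem_cons.mp hm with he | he
        · exact absurd he.symm hh
        · exact he
      exact foldl_ocomb_reach m t h hmem (fun e he => hall e (by simp [he])) hmh

theorem lexTrans (d1 d2 d3 a b c : Int) (h1 : d1 < d2 ∨ (d1 = d2 ∧ a ≤ b))
    (h2 : d2 < d3 ∨ (d2 = d3 ∧ b ≤ c)) : d1 < d3 ∨ (d1 = d3 ∧ a ≤ c) := by omega

-- on the left of the floor quotient, |t - big*w| is antitone in w (strictly off the diagonal)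
theorem absLe_left (t big w1 w2 : Int) (hbig : big ≠ 0) (h1 : w1 ≤ w2)
    (h2 : w2 ≤ PySem.Int.floordiv t big) :
    |t - big * w2| ≤ |t - big * w1| ∧ (|t - big * w2| = |t - big * w1| → w2 = w1) := by
  have hsum := PySem.Int.floordiv_mul_add_mod t big
  set q := PySem.Int.floordiv t big with hq
  set r := PySem.Int.mod t big with hr
  have key1 : t - big * w1 = (q - w1) * big + r := by linear_combination hsum.symm
  have key2 : t - big * w2 = (q - w2) * big + r := by linear_combination hsum.symm
  rcases lt_or_gt_of_ne hbig with hneg | hpos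
  · obtain ⟨hr1, hr2⟩ := PySem.Int.mod_neg_bounds (a := t) hneg
    have s1 : (q - w1) * big ≤ 0 := mul_nonpos_of_nonneg_of_nonpos (by omega) hneg.le
    have s2 : (q - w2) * big ≤ 0 := mul_nonpos_of_nonneg_of_nonpos (by omega) hneg.le
    have n1 : t - big * w1 ≤ 0 := by omega
    have n2 : t - big * w2 ≤ 0 := by omega
    rw [abs_of_nonpos n1, abs_of_nonpos n2]
    have hm := mul_le_mul_of_nonpos_left h1 hneg.le
    constructor
    · omega
    · intro he
      have : big * w2 = big * w1 := by omega
      have := mul_left_cancel₀ hbig this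
      omega
  · obtain hr1 := PySem.Int.mod_nonneg (a := t) hpos
    obtain hr2 := PySem.Int.mod_lt (a := t) hpos
    have s1 : 0 ≤ (q - w1) * big := mul_nonneg (by omega) hpos.le
    have s2 : 0 ≤ (q - w2) * big := mul_nonneg (by omega) hpos.le
    have n1 : 0 ≤ t - big * w1 := by omega
    have n2 : 0 ≤ t - big * w2 := by omega
    rw [abs_of_nonneg n1, abs_of_nonneg n2]
    have hm := mul_le_mul_of_nonneg_left h1 hpos.le
    constructor
    · omega
    · intro he
      have : big * w2 = big * w1 := by omega
      have := mul_left_cancel₀ hbig this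
      omega

-- on the right of the floor quotient, |t - big*w| is monotone in w (strictly off the diagonal)
theorem absLe_right (t big w1 w2 : Int) (hbig : big ≠ 0) (h1 : w1 ≤ w2)
    (h2 : PySem.Int.floordiv t big + 1 ≤ w1) :
    |t - big * w1| ≤ |t - big * w2| ∧ (|t - big * w1| = |t - big * w2| → w1 = w2) := by
  have hsum := PySem.Int.floordiv_mul_add_mod t big
  set q := PySem.Int.floordiv t big with hq
  set r := PySem.Int.mod t big with hr
  have key1 : t - big * w1 = (q - w1) * big + r := by linear_combination hsum.symm
  have key2 : t - big * w2 = (q - w2) * big + r := by linear_combination hsum.symm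
  rcases lt_or_gt_of_ne hbig with hneg | hpos
  · obtain ⟨hr1, hr2⟩ := PySem.Int.mod_neg_bounds (a := t) hneg
    have s1 : (-1) * big ≤ (q - w1) * big := mul_le_mul_of_nonpos_right (by omega) hneg.le
    have s2 : (-1) * big ≤ (q - w2) * big := mul_le_mul_of_nonpos_right (by omega) hneg.le
    have n1 : 0 ≤ t - big * w1 := by omega
    have n2 : 0 ≤ t - big * w2 := by omega
    rw [abs_of_nonneg n1, abs_of_nonneg n2]
    have hm := mul_le_mul_of_nonpos_left h1 hneg.le
    constructor
    · omega
    · intro he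
      have : big * w2 = big * w1 := by omega
      have := mul_left_cancel₀ hbig this
      omega
  · obtain hr1 := PySem.Int.mod_nonneg (a := t) hpos
    obtain hr2 := PySem.Int.mod_lt (a := t) hpos
    have s1 : (q - w1) * big ≤ (-1) * big := mul_le_mul_of_nonneg_right (by omega) hpos.le
    have s2 : (q - w2) * big ≤ (-1) * big := mul_le_mul_of_nonneg_right (by omega) hpos.le
    have n1 : t - big * w1 ≤ 0 := by omega
    have n2 : t - big * w2 ≤ 0 := by omega
    rw [abs_of_nonpos n1, abs_of_nonpos n2]
    have hm := mul_le_mul_of_nonneg_left h1 hpos.le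
    constructor
    · omega
    · intro he
      have : big * w2 = big * w1 := by omega
      have := mul_left_cancel₀ hbig this
      omega

theorem bestZ_spec (t big m : Int) (hm : 0 < m) :
    ∃ d zc, bestZ t big m = some (d, zc) ∧ d = |t - big * zc| ∧ 0 ≤ zc ∧ zc < m ∧
      ∀ z, 0 ≤ z → z < m → d < |t - big * z| ∨ (d = |t - big * z| ∧ zc ≤ z) := by
  by_cases hb0 : big = 0
  · subst hb0
    refine ⟨|t|, 0, by simp [bestZ, hm.not_ge], by simp, le_refl 0, hm, ?_⟩
    intro z hz0 hzm
    right
    simp [hz0]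
  · set q := PySem.Int.floordiv t big with hq
    set zs := if |t - big * q| ≤ |t - big * (q + 1)| then q else q + 1 with hzs
    set zc := max 0 (min (m - 1) zs) with hzc
    have hzc0 : 0 ≤ zc := by omega
    have hzcm : zc < m := by omega
    refine ⟨|t - big * zc|, zc, ?_, rfl, hzc0, hzcm, ?_⟩
    · simp only [bestZ, if_neg hm.not_ge, if_neg hb0]
      rw [← hq, ← hzs, ← hzc]
    · intro z hz0 hzm
      rcases (by omega : z ≤ q ∨ q < z) with hzq | hzq
      · -- z on the left of the quotient
        have hq0 : 0 ≤ q := le_trans hz0 hzq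
        set c1 := min (m - 1) q with hc1
        have hzc1 : z ≤ c1 := by omega
        have hc1q : c1 ≤ q := by omega
        obtain ⟨hle, heq⟩ := absLe_left t big z c1 hb0 hzc1 hc1q
        have rel1 : |t - big * c1| < |t - big * z| ∨
            (|t - big * c1| = |t - big * z| ∧ c1 ≤ z) := by
          rcases hle.lt_or_eq with h | h
          · exact Or.inl h
          · exact Or.inr ⟨h, le_of_eq (heq h)⟩
        have rel2 : |t - big * zc| < |t - big * c1| ∨
            (|t - big * zc| = |t - big * c1| ∧ zc ≤ c1) := by
          by_cases hd : |t - big * q| ≤ |t - big * (q + 1)|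
          · have : zc = c1 := by simp only [hzc, hzs, if_pos hd, ← hc1]; omega
            exact Or.inr ⟨by rw [this], by omega⟩
          · rcases (by omega : q + 1 ≤ m - 1 ∨ m - 1 < q + 1) with hcase | hcase
            · have hzcv : zc = q + 1 := by simp only [hzc, hzs, if_neg hd]; omega
              have hc1v : c1 = q := by omega
              rw [hzcv, hc1v]
              exact Or.inl (by omega)
            · have hzcv : zc = m - 1 := by simp only [hzc, hzs, if_neg hd]; omega
              have hc1v : c1 = m - 1 := by omega
              rw [hzcv, hc1v]
              exact Or.inr ⟨rfl, le_refl _⟩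
        exact lexTrans _ _ _ _ _ _ rel2 rel1
      · -- z on the right of the quotient
        set c2 := max 0 (q + 1) with hc2
        have hc2z : c2 ≤ z := by omega
        have hc2q : q + 1 ≤ c2 := by omega
        obtain ⟨hle, heq⟩ := absLe_right t big c2 z hb0 hc2z hc2q
        have rel1 : |t - big * c2| < |t - big * z| ∨
            (|t - big * c2| = |t - big * z| ∧ c2 ≤ z) := by
          rcases hle.lt_or_eq with h | h
          · exact Or.inl h
          · exact Or.inr ⟨h, le_of_eq (heq h)⟩
        have rel2 : |t - big * zc| < |t - big * c2| ∨
            (|t - big * zc| = |t - big * c2| ∧ zc ≤ c2) := by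
          by_cases hd : |t - big * q| ≤ |t - big * (q + 1)|
          · rcases (by omega : 0 ≤ q ∨ q < 0) with hq0 | hq0
            · have hzcv : zc = q := by simp only [hzc, hzs, if_pos hd]; omega
              have hc2v : c2 = q + 1 := by omega
              rw [hzcv, hc2v]
              rcases hd.lt_or_eq with h | h
              · exact Or.inl h
              · exact Or.inr ⟨h, by omega⟩
            · have hzcv : zc = 0 := by simp only [hzc, hzs, if_pos hd]; omega
              have hc2v : c2 = 0 := by omega
              rw [hzcv, hc2v]
              exact Or.inr ⟨rfl, le_refl _⟩
          · have : zc = c2 := by simp only [hzc, hzs, if_neg hd, ← hc2]; omega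
            exact Or.inr ⟨by rw [this], by omega⟩
        exact lexTrans _ _ _ _ _ _ rel2 rel1

-- the candidate B derives for a fixed (x, y)
def grpOpt (t big buffer m x y : Int) : Option (Int × Int × Int × Int) :=
  match bestZ t big m with
  | none => none
  | some dz => if dz.1 < buffer then some (dz.1, x, y, dz.2) else none

theorem fmin_grp (t big buffer m x y : Int) :
    fmin (grp t big buffer m x y) = grpOpt t big buffer m x y := by
  rcases (by omega : m ≤ 0 ∨ 0 < m) with hm | hm
  · unfold grpOpt
    rw [show bestZ t big m = none from by simp [bestZ, hm], show grp t big buffer m x y = []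
      from by simp [grp, PySem.List.pyRange_one_eq_nil hm]]
    rfl
  · obtain ⟨d, zc, hbz, hd, hzc0, hzcm, hall⟩ := bestZ_spec t big m hm
    unfold grpOpt
    rw [hbz]
    simp only
    by_cases hbuf : d < buffer
    · rw [if_pos hbuf]
      apply fmin_eq_of_min
      · simp only [grp, List.mem_map, List.mem_filter, PySem.List.mem_pyRange_one]
        exact ⟨zc, ⟨⟨hzc0, hzcm⟩, by rw [← hd]; exact decide_eq_true hbuf⟩, by rw [hd]⟩
      · intro e he
        simp only [grp, List.mem_map, List.mem_filter, PySem.List.mem_pyRange_one] at he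
        obtain ⟨z, ⟨⟨hz0, hzm⟩, hzbuf⟩, rfl⟩ := he
        rcases hall z hz0 hzm with hlt | ⟨heq, hle⟩
        · right
          simp [entLt]
          omega
        · rcases hle.lt_or_eq with hlt | heqz
          · right
            simp [entLt]
            omega
          · left
            rw [heq, heqz]
    · rw [if_neg hbuf]
      rw [show grp t big buffer m x y = [] from ?_]
      · rfl
      · unfold grp
        rw [List.filter_eq_nil_iff.mpr ?_]
        · rfl
        · intro z hz
          rw [PySem.List.mem_pyRange_one] at hz
          rcases hall z hz.1 hz.2 with hlt | ⟨heq, _⟩ <;> simp <;> omega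

theorem foldl_append_if_prop {α β : Type} (P : α → Prop) [DecidablePred P] (f : α → β) :
    ∀ (l : List α) (acc : List β),
      l.foldl (fun acc x => if P x then acc ++ [f x] else acc) acc =
        acc ++ (l.filter (fun x => decide (P x))).map f := by
  intro l
  induction l with
  | nil => intro acc; simp
  | cons h t ih =>
    intro acc
    by_cases hp : P h <;> simp [hp, ih]

theorem zfold_eq (pixels small med big buffer m x y : Int)
    (acc : List (Int × Int × Int × Int)) :
    (PySem.List.pyRange 0 m 1).foldl (fun acc z =>
        if pixels - buffer < small * x + med * y + big * z ∧
            small * x + med * y + big * z < pixels + buffer then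
          acc ++ [(|pixels - (small * x + med * y + big * z)|, x, y, z)]
        else acc) acc =
      acc ++ grp (pixels - small * x - med * y) big buffer m x y := by
  rw [foldl_append_if_prop]
  unfold grp
  congr 1
  have hp : (fun z : Int => decide (pixels - buffer < small * x + med * y + big * z ∧
      small * x + med * y + big * z < pixels + buffer)) =
      (fun z : Int => decide (|pixels - small * x - med * y - big * z| < buffer)) := by
    funext z
    rw [decide_eq_decide, abs_lt]
    constructor <;> intro h <;> exact ⟨by linarith [h.1, h.2], by linarith [h.1, h.2]⟩
  have hf : (fun z : Int => (|pixels - (small * x + med * y + big * z)|, x, y, z)) =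
      (fun z : Int => (|pixels - small * x - med * y - big * z|, x, y, z)) := by
    funext z
    have : pixels - (small * x + med * y + big * z) =
        pixels - small * x - med * y - big * z := by ring
    rw [this]
  rw [hp, hf]

-- A's final rendering, as a function of the first minimal element
theorem render_fmin (l : List (Int × Int × Int × Int)) :
    (match l with
      | [] => ([0, 0, 0] : List Int)
      | h :: t =>
        let mxx := t.foldl (fun m e => if entLt e m then e else m) h
        [mxx.2.1, mxx.2.2.1, mxx.2.2.2]) =
      (match fmin l with
        | none => ([0, 0, 0] : List Int)
        | some m => [m.2.1, m.2.2.1, m.2.2.2]) := by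
  cases l with
  | nil => rfl
  | cons h t => rw [fmin_cons]

-- B's loop body combines the running best with the group candidate
theorem altbody_eq (b : Option (Int × Int × Int × Int)) (bz : Option (Int × Int))
    (buffer x y : Int) :
    (match bz with
      | none => b
      | some dz =>
        if dz.1 < buffer then
          match b with
          | none => some (dz.1, x, y, dz.2)
          | some m => if entLt (dz.1, x, y, dz.2) m then some (dz.1, x, y, dz.2) else some m
        else b) =
      ocomb b (match bz with
        | none => none
        | some dz => if dz.1 < buffer then some (dz.1, x, y, dz.2) else none) := by
  cases bz with
  | none => rw [ocomb_none_right]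
  | some dz =>
    by_cases hbuf : dz.1 < buffer
    · simp only [if_pos hbuf]
      cases b <;> rfl
    · simp only [if_neg hbuf]
      rw [ocomb_none_right]

-- ===== VERDICT (by name: the statement is the Claim_ definition above) =====
theorem square_list_spec : Claim_equal_square_list := by
  unfold Claim_equal_square_list
  intro pixels small med big buffer max_small max_med max_big _dom
  unfold Spec_square_list square_list square_list_alt
  by_cases hpx : pixels < 175
  · simp only [if_pos hpx]
  · simp only [if_neg hpx]
    -- A's accumulated list is the concatenation of the per-(x, y) groups
    have hinner : (fun (acc : List (Int × Int × Int × Int)) (x : Int) =>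
        (PySem.List.pyRange 0 max_med 1).foldl (fun acc y =>
          (PySem.List.pyRange 0 max_big 1).foldl (fun acc z =>
            if pixels - buffer < small * x + med * y + big * z ∧
                small * x + med * y + big * z < pixels + buffer then
              acc ++ [(|pixels - (small * x + med * y + big * z)|, x, y, z)]
            else acc) acc) acc) =
        (fun acc x => acc ++ (PySem.List.pyRange 0 max_med 1).flatMap (fun y =>
          grp (pixels - small * x - med * y) big buffer max_big x y)) := by
      funext acc x
      rw [show (fun (acc : List (Int × Int × Int × Int)) (y : Int) =>
          (PySem.List.pyRange 0 max_big 1).foldl (fun acc z =>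
            if pixels - buffer < small * x + med * y + big * z ∧
                small * x + med * y + big * z < pixels + buffer then
              acc ++ [(|pixels - (small * x + med * y + big * z)|, x, y, z)]
            else acc) acc) =
          (fun acc y => acc ++ grp (pixels - small * x - med * y) big buffer max_big x y)
        from funext fun acc => funext fun y => zfold_eq pixels small med big buffer max_big x y acc]
      exact PySem.List.foldl_append_eq_flatMap _ _ _
    rw [hinner, PySem.List.foldl_append_eq_flatMap, List.nil_append, render_fmin,
      fmin_flatMap]
    simp only [fmin_flatMap, fmin_grp]
    -- B's running minimum computes the same combination
    have hbody : (fun (b : Option (Int × Int × Int × Int)) (x : Int) =>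
        (PySem.List.pyRange 0 max_med 1).foldl (fun b y =>
          match bestZ (pixels - small * x - med * y) big max_big with
          | none => b
          | some dz =>
            if dz.1 < buffer then
              match b with
              | none => some (dz.1, x, y, dz.2)
              | some m => if entLt (dz.1, x, y, dz.2) m then some (dz.1, x, y, dz.2) else some m
            else b) b) =
        (fun b x => ocomb b ((PySem.List.pyRange 0 max_med 1).foldl (fun o y =>
          ocomb o (grpOpt (pixels - small * x - med * y) big buffer max_big x y)) none)) := by
      funext b x
      rw [show (fun (b : Option (Int × Int × Int × Int)) (y : Int) =>
          match bestZ (pixels - small * x - med * y) big max_big with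
          | none => b
          | some dz =>
            if dz.1 < buffer then
              match b with
              | none => some (dz.1, x, y, dz.2)
              | some m => if entLt (dz.1, x, y, dz.2) m then some (dz.1, x, y, dz.2) else some m
            else b) =
          (fun b y => ocomb b (grpOpt (pixels - small * x - med * y) big buffer max_big x y))
        from funext fun b => funext fun y =>
          (altbody_eq b (bestZ (pixels - small * x - med * y) big max_big) buffer x y).trans
            (by rfl)]
      exact foldl_ocomb_init _ _ b
    rw [hbody]
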